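-- pv_equiv track=rewrite | github.com/JeongHM/coding_test | programmers/level_1/woowa_1.py | solution
-- ===== SOURCE A (Python) =====
-- def solution(arr):
--     count = 1
--     tmp = None
--     while count < 10:
--         answer = list()
--         arr.append(0)
--         num = 1
--
--         for i in range(len(arr) - 1):
--             if arr[i] != arr[i+1]:
--                 answer.append(num)
--                 num = 1
--             else:
--                 num+= 1
--         count += 1
--         arr = answer
--         if len(arr) == 1:
--             break
--     return count
-- ===== SOURCE B (Python) =====
-- def _runs(a):
--     # run lengths of a, dropping the final run (a is never empty here)
--     out = []
--     j = 0
--     while True: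
--         k = j
--         while k < len(a) and a[k] == a[j]:
--             k += 1
--         if k == len(a):
--             return out
--         out.append(k - j)
--         j = k
--
--
-- def _rounds(a, count):
--     if count >= 10:
--         return count
--     a.append(0)
--     nxt = _runs(a)
--     if len(nxt) == 1:
--         return count + 1
--     return _rounds(nxt, count + 1)
--
--
-- def solution(arr):
--     return _rounds(arr, 1)
-- ===== Notes on version B (the rewrite author's own statement) =====
-- stated objective: alternative
-- what changed: Replaces A's index-driven while loop (fold over range(len-1) comparing arr[i] vs arr[i+1] with a reset accumulator) by a recursive outer loop and a value-driven two-pointer run scanner that consumes whole runs of equal elements at a time and drops the final sentinel run.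
import Mathlib
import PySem

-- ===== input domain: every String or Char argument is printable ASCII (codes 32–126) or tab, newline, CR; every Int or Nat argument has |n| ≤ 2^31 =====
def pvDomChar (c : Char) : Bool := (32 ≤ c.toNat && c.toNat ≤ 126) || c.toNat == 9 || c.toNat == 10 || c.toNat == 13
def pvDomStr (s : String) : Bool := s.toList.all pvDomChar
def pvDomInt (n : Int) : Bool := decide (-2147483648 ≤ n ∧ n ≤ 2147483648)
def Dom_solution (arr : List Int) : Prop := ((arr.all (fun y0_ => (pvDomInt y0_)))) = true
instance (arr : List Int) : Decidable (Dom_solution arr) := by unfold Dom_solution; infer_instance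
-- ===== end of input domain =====

-- B replaces A's index-based boundary fold and while loop by a recursive round function and a
-- value-driven run scanner; same cost. Both Pythons append a sentinel 0 to the caller's list
-- (identical observable mutation in A and B); the theorems are about the return value.

-- ===== PORT A =====
-- one round of A: append sentinel 0, fold over indices carrying (answer, num)
def stepA (arr : List Int) : List Int :=
  let arr2 := arr ++ [0]
  ((List.range (arr2.length - 1)).foldl
    (fun (s : List Int × Int) i =>
      if arr2.getD i 0 ≠ arr2.getD (i + 1) 0 then (s.1 ++ [s.2], 1) else (s.1, s.2 + 1))
    ([], 1)).1

-- the `while count < 10` loop: count starts at 1 and increases by 1 each pass, so 9 passes suffice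
def loopA : Nat → Int → List Int → Int
  | 0, count, _ => count
  | fuel + 1, count, arr =>
    if count < 10 then
      let answer := stepA arr
      let count := count + 1
      if answer.length = 1 then count else loopA fuel count answer
    else count

def solution (arr : List Int) : Int := loopA 9 1 arr

-- ===== PORT B =====
-- inner while of _runs: consume the leading run of elements equal to x, return (its extra length, rest)
def takeRun (x : Int) : List Int → Nat × List Int
  | [] => (0, [])
  | y :: ys => if y = x then ((takeRun x ys).1 + 1, (takeRun x ys).2) else (0, y :: ys)

lemma takeRun_len (x : Int) (ys : List Int) : (takeRun x ys).2.length ≤ ys.length := by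
  induction ys with
  | nil => simp [takeRun]
  | cons y ys ih =>
    simp only [takeRun]
    split_ifs <;> simp <;> omega

-- _runs: run lengths, dropping the final run
def runsB : List Int → List Int
  | [] => []
  | x :: xs =>
    if (takeRun x xs).2 = [] then []
    else ((takeRun x xs).1 + 1 : Int) :: runsB (takeRun x xs).2
  termination_by l => l.length
  decreasing_by
    have := takeRun_len x xs
    simp; omega

-- _rounds: recursive outer loop on count
def roundsB (a : List Int) (count : Int) : Int :=
  if h : count < 10 then
    let nxt := runsB (a ++ [0])
    if nxt.length = 1 then count + 1 else roundsB nxt (count + 1)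
  else count
  termination_by (10 - count).toNat
  decreasing_by omega

def solution_alt (arr : List Int) : Int := roundsB arr 1

-- ===== PRECONDITION & SPEC =====
def Spec_solution (arr : List Int) (out : Int) : Prop := out = solution_alt arr
instance (arr : List Int) (out : Int) : Decidable (Spec_solution arr out) := by unfold Spec_solution; infer_instance

-- ===== CLAIM =====
def Claim_equal_solution : Prop := ∀ (arr : List Int), Dom_solution arr → Spec_solution arr (solution arr)

-- ===== LEMMAS AND PROOFS =====

-- a value-level rendering of A's inner fold, recursing on adjacent pairs
def runsA (num : Int) : List Int → List Int
  | [] => []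
  | [_] => []
  | x :: y :: rest => if x ≠ y then num :: runsA 1 (y :: rest) else runsA (num + 1) (y :: rest)

-- the indices 0..len-2 paired through getD are exactly the adjacent pairs
lemma map_range_pairs (l : List Int) :
    (List.range (l.length - 1)).map (fun i => (l.getD i 0, l.getD (i + 1) 0)) = l.zip l.tail := by
  apply List.ext_getElem
  · simp [List.length_zip]
  · intro i h1 h2
    simp only [List.getElem_map, List.getElem_range, List.getElem_zip]
    have hi : i < l.length - 1 := by simpa using h1
    have h3 : i < l.length := by omega
    have h4 : i + 1 < l.length := by omega
    have h5 : i < l.tail.length := by simp; omega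
    simp [List.getD_eq_getElem?_getD, List.getElem?_eq_getElem, h3, h4,
      List.getElem_tail]

lemma pairfold_eq_runsA (l : List Int) (ans : List Int) (num : Int) :
    ((l.zip l.tail).foldl
      (fun (s : List Int × Int) p => if p.1 ≠ p.2 then (s.1 ++ [s.2], 1) else (s.1, s.2 + 1))
      (ans, num)).1 = ans ++ runsA num l := by
  induction l generalizing ans num with
  | nil => simp [runsA]
  | cons x xs ih =>
    cases xs with
    | nil => simp [runsA]
    | cons y ys =>
      simp only [List.zip_cons_cons, List.tail_cons, List.foldl_cons, runsA]
      by_cases h : x = y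
      · simp only [h, ne_eq, not_true_eq_false, if_neg, ite_false, not_not]
        rw [show (List.zip (y :: ys) ys) = List.zip (y :: ys) (y :: ys).tail by simp]
        rw [ih]
      · simp only [ne_eq, h, not_false_iff, if_pos, ite_true]
        rw [show (List.zip (y :: ys) ys) = List.zip (y :: ys) (y :: ys).tail by simp]
        rw [ih, List.append_assoc]
        simp

-- A's value-level recursion equals B's run scanner
lemma runsB_nil : runsB [] = [] := by rw [runsB.eq_def]

lemma runsB_cons (x : Int) (xs : List Int) :
    runsB (x :: xs) = if (takeRun x xs).2 = [] then []
      else ((takeRun x xs).1 + 1 : Int) :: runsB (takeRun x xs).2 := by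
  rw [runsB.eq_def]

lemma runsA_rel (xs : List Int) (x : Int) (num : Int) :
    runsA num (x :: xs)
      = if (takeRun x xs).2 = [] then []
        else (num + (takeRun x xs).1 : Int) :: runsB (takeRun x xs).2 := by
  induction xs generalizing x num with
  | nil => simp [runsA, takeRun]
  | cons y ys ih =>
    by_cases h : x = y
    · subst h
      have ht : takeRun x (x :: ys) = ((takeRun x ys).1 + 1, (takeRun x ys).2) := by
        simp [takeRun]
      rw [show runsA num (x :: x :: ys) = runsA (num + 1) (x :: ys) from by simp [runsA]]
      rw [ht, ih x (num + 1)]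
      split_ifs with h2
      · rfl
      · congr 1
        push_cast; ring
    · have hy : ¬ y = x := fun e => h (Eq.symm e)
      have ht : takeRun x (y :: ys) = (0, y :: ys) := by
        simp [takeRun, hy]
      rw [show runsA num (x :: y :: ys) = num :: runsA 1 (y :: ys) from by simp [runsA, h]]
      rw [ht, ih y 1]
      simp only [if_neg (List.cons_ne_nil y ys)]
      rw [runsB_cons]
      split_ifs with h2
      · simp
      · push_cast
        congr 1
        · ring
        congr 1
        ring

lemma runsA_eq_runsB (l : List Int) : runsA 1 l = runsB l := by
  cases l with
  | nil => rw [runsB_nil]; rfl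
  | cons x xs =>
    rw [runsA_rel, runsB_cons]
    split_ifs with h
    · rfl
    · congr 1
      push_cast; ring

lemma stepA_eq_runsB (arr : List Int) : stepA arr = runsB (arr ++ [0]) := by
  have h := pairfold_eq_runsA (arr ++ [0]) [] 1
  rw [← map_range_pairs (arr ++ [0]), List.foldl_map] at h
  simp only [List.nil_append, runsA_eq_runsB] at h
  simpa [stepA] using h

lemma loopA_eq_roundsB (fuel : Nat) (count : Int) (arr : List Int)
    (hf : (10 - count).toNat ≤ fuel) : loopA fuel count arr = roundsB arr count := by
  induction fuel generalizing count arr with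
  | zero =>
    have : ¬ count < 10 := by omega
    rw [loopA, roundsB]
    simp [this]
  | succ fuel ih =>
    rw [loopA, roundsB]
    by_cases h : count < 10
    · simp only [h, if_pos, dif_pos, stepA_eq_runsB]
      split_ifs with h2
      · rfl
      · exact ih (count + 1) _ (by omega)
    · simp [h]

-- ===== VERDICT =====
theorem solution_spec : Claim_equal_solution := by
  intro arr _
  unfold Spec_solution solution solution_alt
  exact loopA_eq_roundsB 9 1 arr (by norm_num)
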